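-- pv_equiv track=rewrite | github.com/yoptohlejepeta/N_in_a_row | piskvorky.py | doplneni_diagonal2
-- ===== SOURCE A (Python) =====
-- import copy
--
-- def doplneni_diagonal2(matice):
--   matice3 = copy.deepcopy(matice)
--   for radek in matice3:
--     for i in range(matice3.index(radek) + len(radek)):
--       radek.insert(0,'_')
--     for i in range(matice3.index(radek)):
--       radek.append('_')
--   matice3 = list(map(list, zip(*matice3)))
--   return matice3
-- ===== SOURCE B (Python) =====
-- def doplneni_diagonal2(matice):
--     # Output column-major directly: cell (c, i) of the result is '_' unless c falls
--     # in the original row's band [i+len(r), i+2*len(r)); no padded rows are built.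
--     if not matice:
--         return []
--     w = min(2 * (i + len(r)) for i, r in enumerate(matice))
--     out = []
--     for c in range(w):
--         col = []
--         for i, r in enumerate(matice):
--             p = i + len(r)
--             col.append(r[c - p] if p <= c < p + len(r) else '_')
--         out.append(col)
--     return out
-- ===== Notes on version B (the rewrite author's own statement) =====
-- stated objective: faster
-- what changed: B never builds the padded rows at all: it computes the output width as min(2*(i+len(r))) by one enumerate pass and then writes each output cell directly by index arithmetic (underscore unless the column index falls in the row's shifted band), replacing A's deepcopy, repeated list.index rescans, element-by-element insert(0,'_') shifts and the final zip transpose.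
import Mathlib
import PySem

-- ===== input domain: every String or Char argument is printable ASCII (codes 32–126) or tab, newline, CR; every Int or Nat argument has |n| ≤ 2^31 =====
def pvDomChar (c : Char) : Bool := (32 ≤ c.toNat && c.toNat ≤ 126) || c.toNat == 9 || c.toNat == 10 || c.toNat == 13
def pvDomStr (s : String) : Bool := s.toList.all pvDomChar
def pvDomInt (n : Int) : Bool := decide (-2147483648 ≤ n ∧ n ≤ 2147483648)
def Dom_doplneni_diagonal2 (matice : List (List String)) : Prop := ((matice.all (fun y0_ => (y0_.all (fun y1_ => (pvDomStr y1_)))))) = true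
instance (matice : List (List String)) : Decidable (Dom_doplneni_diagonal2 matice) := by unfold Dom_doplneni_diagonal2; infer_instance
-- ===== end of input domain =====

-- B never materialises padded rows: it computes the output width by one min-fold over
-- enumerate and writes each output cell directly by index arithmetic ('_' unless the
-- column index falls in the row's shifted band), replacing A's deepcopy, list.index
-- rescans, insert(0,'_') shifts and final transpose; proved to return A's exact value
-- on all inputs. A mutates only its internal deepcopy, so there is no side effect to mirror.

-- ===== PORT A =====
-- one iteration of A's `for radek in matice3` loop, acting on the row at position i
def stepA (m : List (List String)) (i : Nat) : List (List String) :=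
  let radek := m.getD i []
  let p := m.findIdx (· == radek) + radek.length
  let radek1 := (List.range p).foldl (fun r _ => "_" :: r) radek      -- for _ in range(p): radek.insert(0,'_')
  let m1 := m.set i radek1
  let q := m1.findIdx (· == radek1)
  m1.set i (radek1 ++ List.replicate q "_")                            -- for _ in range(q): radek.append('_')

-- list(map(list, zip(*m))): columns 0..min(len)-1
def pyZipT (m : List (List String)) : List (List String) :=
  (List.range (((m.map List.length).min?).getD 0)).map (fun c => m.map (fun r => r.getD c ""))

def doplneni_diagonal2 (matice : List (List String)) : List (List String) :=
  pyZipT ((List.range matice.length).foldl stepA matice)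

-- ===== PORT B =====
-- r[c - p] if p <= c < p + len(r) else '_'   (the inner comprehension's cell)
def cellB (i : Nat) (r : List String) (c : Nat) : String :=
  let p := i + r.length
  if p ≤ c ∧ c < p + r.length then r.getD (c - p) "" else "_"

def doplneni_diagonal2_alt (matice : List (List String)) : List (List String) :=
  match matice with
  | [] => []                                                           -- if not matice: return []
  | r0 :: rs =>
    -- w = min(2 * (i + len(r)) for i, r in enumerate(matice)): left fold of min
    let w := (rs.zipIdx 1).foldl (fun acc ri => Nat.min acc (2 * (ri.2 + ri.1.length)))
      (2 * (0 + r0.length))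
    -- for c in range(w): [cell for i, r in enumerate(matice)]
    (List.range w).map (fun c => ((r0 :: rs).zipIdx 0).map (fun ri => cellB ri.2 ri.1 c))

-- ===== PRECONDITION & SPEC =====
def Spec_doplneni_diagonal2 (matice : List (List String)) (out : List (List String)) : Prop := out = doplneni_diagonal2_alt matice
instance (matice : List (List String)) (out : List (List String)) : Decidable (Spec_doplneni_diagonal2 matice out) := by unfold Spec_doplneni_diagonal2; infer_instance

-- ===== CLAIM (what is proved, stated in full; the proofs are below) =====
def Claim_equal_doplneni_diagonal2 : Prop := ∀ (matice : List (List String)), Dom_doplneni_diagonal2 matice → Spec_doplneni_diagonal2 matice (doplneni_diagonal2 matice)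

-- ===== LEMMAS AND PROOFS =====

-- the row at position k of A's matrix after both padding loops (proof-side description)
def blow (k : Nat) (r : List String) : List String :=
  List.replicate (k + r.length) "_" ++ r ++ List.replicate k "_"

def blowRows (k : Nat) : List (List String) → List (List String)
  | [] => []
  | r :: rs => blow k r :: blowRows (k + 1) rs

-- A's final row k, computed from the already-final rows `pre` before it
def aStep (pre : List (List String)) (r : List String) : List String :=
  let i1 := pre.findIdx (· == r)
  let t := List.replicate (i1 + r.length) "_" ++ r
  let i2 := pre.findIdx (· == t)
  t ++ List.replicate i2 "_"

-- the list of A's final rows 0..i-1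
def aRows (matice : List (List String)) : Nat → List (List String)
  | 0 => []
  | i + 1 => aRows matice i ++ [aStep (aRows matice i) (matice.getD i [])]

def af (matice : List (List String)) (k : Nat) : List String :=
  aStep (aRows matice k) (matice.getD k [])

theorem length_aRows (m : List (List String)) (i : Nat) : (aRows m i).length = i := by
  induction i with
  | zero => rfl
  | succ i ih => simp [aRows, ih]

theorem aRows_get? (m : List (List String)) {k i : Nat} (h : k < i) :
    (aRows m i)[k]? = some (af m k) := by
  induction i with
  | zero => omega
  | succ i ih =>
    rcases Nat.lt_succ_iff_lt_or_eq.mp h with h' | h'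
    · rw [aRows, List.getElem?_append_left (by rw [length_aRows]; exact h')]
      exact ih h'
    · subst h'
      have hl : (aRows m k).length = k := length_aRows m k
      rw [aRows, List.getElem?_append_right (by omega), hl]
      simp [af]

theorem prepend_loop (p : Nat) (r : List String) :
    (List.range p).foldl (fun r _ => "_" :: r) r = List.replicate p "_" ++ r := by
  induction p with
  | zero => rfl
  | succ p ih => simp [List.range_succ, List.foldl_append, ih, List.replicate_succ]

theorem findIdx_append_cons_self {x : List String} {l1 l2 : List (List String)} :
    (l1 ++ x :: l2).findIdx (· == x) = l1.findIdx (· == x) := by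
  induction l1 with
  | nil => simp [List.findIdx_cons]
  | cons a l1 ih =>
    by_cases ha : (a == x) = true
    · simp [List.findIdx_cons, ha]
    · simp only [List.cons_append, List.findIdx_cons, ha, cond_false, ih]

theorem set_append_len {α : Type} (l1 : List α) (x y : α) (l2 : List α) {i : Nat}
    (h : l1.length = i) : (l1 ++ x :: l2).set i y = l1 ++ y :: l2 := by
  subst h; simp

-- the A loop, unrolled: after i steps the first i rows are final, the rest original
theorem foldA (m : List (List String)) (i : Nat) (h : i ≤ m.length) :
    (List.range i).foldl stepA m = aRows m i ++ m.drop i := by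
  induction i with
  | zero => simp [aRows]
  | succ i ih =>
    have hi : i < m.length := by omega
    rw [List.range_succ, List.foldl_append, ih (by omega), List.foldl_cons, List.foldl_nil]
    rw [List.drop_eq_getElem_cons hi]
    have hlen : (aRows m i).length = i := length_aRows m i
    have hget : m.getD i [] = m[i] := by simp [List.getD, List.getElem?_eq_getElem hi]
    show stepA (aRows m i ++ m[i] :: m.drop (i + 1)) i = aRows m (i + 1) ++ m.drop (i + 1)
    rw [aRows]
    unfold stepA aStep
    dsimp only
    rw [show (aRows m i ++ m[i] :: m.drop (i + 1)).getD i [] = m[i] from by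
      rw [List.getD, List.getElem?_append_right (by omega), hlen]; simp [List.getElem?_eq_getElem hi]]
    rw [findIdx_append_cons_self]
    rw [prepend_loop]
    rw [set_append_len _ _ _ _ hlen]
    rw [findIdx_append_cons_self]
    rw [set_append_len _ _ _ _ hlen]
    simp [List.getD, List.getElem?_eq_getElem hi]

theorem length_blowRows (k : Nat) (rs : List (List String)) :
    (blowRows k rs).length = rs.length := by
  induction rs generalizing k with
  | nil => rfl
  | cons r rs ih => simp [blowRows, ih]

theorem blowRows_get? (k j : Nat) (rs : List (List String)) (h : j < rs.length) :
    (blowRows k rs)[j]? = some (blow (k + j) (rs.getD j [])) := by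
  induction rs generalizing k j with
  | nil => simp at h
  | cons r rs ih =>
    cases j with
    | zero => simp [blowRows, blow]
    | succ j =>
      simp only [blowRows, List.getElem?_cons_succ, List.getD_cons_succ]
      rw [ih (k + 1) j (by simpa using h)]
      ring_nf

theorem take_append_eq_take_append {M : Nat} (l s1 s2 : List String) (h : M ≤ l.length) :
    (l ++ s1).take M = (l ++ s2).take M := by
  rw [List.take_append_of_le_length h, List.take_append_of_le_length h]

theorem take_rep_prefix {M p : Nat} (x : String) (s : List String) (h : M ≤ p) :
    (List.replicate p x ++ s).take M = List.replicate M x := by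
  rw [List.take_append_of_le_length (by simpa using h), List.take_replicate, Nat.min_eq_left h]

theorem length_blow (k : Nat) (r : List String) : (blow k r).length = 2 * (k + r.length) := by
  simp [blow]; ring

-- the minimum final width
def Mw (m : List (List String)) : Nat := (((blowRows 0 m).map List.length).min?).getD 0

theorem Mw_le (m : List (List String)) {k : Nat} (h : k < m.length) :
    Mw m ≤ 2 * (k + (m.getD k []).length) := by
  have hmem : 2 * (k + (m.getD k []).length) ∈ (blowRows 0 m).map List.length := by
    refine List.mem_of_getElem? (i := k) ?_
    rw [List.getElem?_map, blowRows_get? 0 k m h]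
    simp [length_blow]
  obtain ⟨a, ha⟩ : ∃ a, ((blowRows 0 m).map List.length).min? = some a := by
    cases hmin : ((blowRows 0 m).map List.length).min? with
    | none => rw [List.min?_eq_none_iff] at hmin; rw [hmin] at hmem; simp at hmem
    | some a => exact ⟨a, rfl⟩
  have hb := List.min?_eq_some_iff.mp ha
  unfold Mw
  rw [ha]
  exact hb.2 _ hmem

-- the key invariant: every final A row is ≥ Mw long, agrees with the padded row on the
-- first Mw cells, and hits length exactly Mw whenever the padded row has minimal length
theorem Qinv (m : List (List String)) (k : Nat) (hk : k < m.length) :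
    (Mw m ≤ (af m k).length ∧ (af m k).take (Mw m) = (blow k (m.getD k [])).take (Mw m))
      ∧ (2 * (k + (m.getD k []).length) = Mw m → (af m k).length = Mw m) := by
  induction k using Nat.strong_induction_on with
  | _ k IH =>
  have hpre : (aRows m k).length = k := length_aRows m k
  have hMle : Mw m ≤ 2 * (k + (m.getD k []).length) := Mw_le m hk
  unfold af aStep
  dsimp only
  set r := m.getD k [] with hr
  set i1 := (aRows m k).findIdx (· == r) with hi1
  have hi1le : i1 ≤ k := hpre ▸ List.findIdx_le_length
  by_cases h1 : i1 < k
  · -- first `index` call hit an earlier (final) row: r equals that row, so r is ≥ Mw long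
    have hg : (aRows m k)[i1] == r := List.findIdx_getElem (w := by rw [hpre]; exact h1)
    have hge : (aRows m k)[i1] = af m i1 := by
      have := aRows_get? m h1
      simp only [List.getElem?_eq_getElem (by rw [hpre]; exact h1)] at this
      exact Option.some.inj this
    have hrlen : Mw m ≤ r.length := by
      have := ((IH i1 h1 (by omega)).1).1
      rw [← hge] at this
      rw [← (eq_of_beq hg)]
      exact this
    constructor
    · constructor
      · simp only [List.length_append, List.length_replicate]
        omega
      · rw [List.append_assoc, take_rep_prefix _ _ (by omega)]
        rw [blow, List.append_assoc, take_rep_prefix _ _ (by omega)]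
    · intro hmin
      omega
  · have hi1k : i1 = k := by omega
    rw [hi1k]
    set t := List.replicate (k + r.length) "_" ++ r with ht
    have htlen : t.length = k + r.length + r.length := by simp [ht]
    have hblow : blow k r = t ++ List.replicate k "_" := by
      rw [blow, ht, List.append_assoc]
    set i2 := (aRows m k).findIdx (· == t) with hi2
    have hi2le : i2 ≤ k := hpre ▸ List.findIdx_le_length
    by_cases h2 : i2 < k
    · -- second `index` call hit an earlier row: t equals that row, so t is ≥ Mw long
      have hg : (aRows m k)[i2] == t := List.findIdx_getElem (w := by rw [hpre]; exact h2)
      have hge : (aRows m k)[i2] = af m i2 := by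
        have := aRows_get? m h2
        simp only [List.getElem?_eq_getElem (by rw [hpre]; exact h2)] at this
        exact Option.some.inj this
      have htge : Mw m ≤ t.length := by
        have := ((IH i2 h2 (by omega)).1).1
        rw [← hge] at this
        rw [← (eq_of_beq hg)]
        exact this
      constructor
      · constructor
        · simp only [List.length_append]
          omega
        · rw [hblow]
          exact take_append_eq_take_append _ _ _ htge
      · intro hmin
        have hlow : Mw m ≤ t.length + i2 := by
          calc Mw m ≤ t.length := htge
          _ ≤ t.length + i2 := Nat.le_add_right _ _
        simp only [List.length_append, List.length_replicate]
        omega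
    · have hi2k : i2 = k := by omega
      rw [hi2k, ← hblow]
      have hblen : (blow k r).length = 2 * (k + r.length) := length_blow k r
      exact ⟨⟨by omega, rfl⟩, by omega⟩

theorem getD_eq_of_take_eq {c M : Nat} {l1 l2 : List String} (hc : c < M)
    (he : l1.take M = l2.take M) : l1.getD c "" = l2.getD c "" := by
  have h1 : (l1.take M)[c]? = l1[c]? := by rw [List.getElem?_take]; simp [hc]
  have h2 : (l2.take M)[c]? = l2[c]? := by rw [List.getElem?_take]; simp [hc]
  rw [List.getD, List.getD, ← h1, ← h2, he]

-- the widths of A's final rows have the same minimum as the padded widths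
theorem Amin (m : List (List String)) (h : m ≠ []) :
    (((aRows m m.length).map List.length).min?).getD 0 = Mw m := by
  have hn : 0 < m.length := List.length_pos_iff.mpr h
  obtain ⟨a, ha⟩ : ∃ a, ((blowRows 0 m).map List.length).min? = some a := by
    cases hmin : ((blowRows 0 m).map List.length).min? with
    | none =>
      exfalso
      rw [List.min?_eq_none_iff, List.map_eq_nil_iff] at hmin
      have hL := length_blowRows 0 m
      rw [hmin] at hL
      simp only [List.length_nil] at hL
      omega
    | some a => exact ⟨a, rfl⟩
  have haM : Mw m = a := by unfold Mw; rw [ha]; rfl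
  have hb := List.min?_eq_some_iff.mp ha
  obtain ⟨k0, hk0lt, hk0⟩ := List.mem_iff_getElem.mp hb.1
  have hk0n : k0 < m.length := by
    rw [List.length_map, length_blowRows] at hk0lt; exact hk0lt
  have hLB : 2 * (k0 + (m.getD k0 []).length) = Mw m := by
    have hg : (blowRows 0 m)[k0]? = some (blow (0 + k0) (m.getD k0 [])) :=
      blowRows_get? 0 k0 m hk0n
    have : ((blowRows 0 m).map List.length)[k0]? = some a := by
      rw [List.getElem?_eq_getElem hk0lt, hk0]
    rw [List.getElem?_map, hg] at this
    have h3 := Option.some.inj this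
    rw [haM, ← h3, Nat.zero_add, length_blow]
  have hAk0 : (af m k0).length = Mw m := (Qinv m k0 hk0n).2 hLB
  have hmin : ((aRows m m.length).map List.length).min? = some (Mw m) := by
    rw [List.min?_eq_some_iff]
    constructor
    · rw [List.mem_iff_getElem?]
      refine ⟨k0, ?_⟩
      rw [List.getElem?_map, aRows_get? m hk0n]
      simp [hAk0]
    · intro b hbmem
      obtain ⟨k, hklt, hkb⟩ := List.mem_iff_getElem.mp hbmem
      have hkn : k < m.length := by rw [List.length_map, length_aRows] at hklt; exact hklt
      have : ((aRows m m.length).map List.length)[k]? = some b := by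
        rw [List.getElem?_eq_getElem hklt, hkb]
      rw [List.getElem?_map, aRows_get? m hkn] at this
      have h3 := Option.some.inj this
      rw [← h3]
      exact ((Qinv m k hkn).1).1
  rw [hmin]
  rfl

-- B's index arithmetic reads exactly the padded row's cell (for in-range columns)
theorem cellB_eq_blow (k : Nat) (r : List String) {c : Nat} (hc : c < 2 * (k + r.length)) :
    cellB k r c = (blow k r).getD c "" := by
  unfold cellB blow
  dsimp only
  simp only [List.getD]
  by_cases h1 : c < k + r.length
  · rw [if_neg (by omega),
      List.getElem?_append_left (by simp; omega),
      List.getElem?_append_left (by simpa using h1), List.getElem?_replicate]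
    simp [h1]
  · by_cases h2 : c < k + r.length + r.length
    · rw [if_pos ⟨by omega, by omega⟩,
        List.getElem?_append_left (l₂ := List.replicate k "_") (by simp; omega),
        List.getElem?_append_right (by simp; omega), List.length_replicate]
    · rw [if_neg (by omega),
        List.getElem?_append_right (by simp; omega), List.getElem?_replicate]
      have h3 : c - (List.replicate (k + r.length) "_" ++ r).length < k := by simp; omega
      rw [if_pos (by simpa using h3)]
      rfl

-- the widths B folds over are the padded rows' lengths
theorem widths_eq (k : Nat) (rs : List (List String)) :
    (blowRows k rs).map List.length = (rs.zipIdx k).map (fun ri => 2 * (ri.2 + ri.1.length)) := by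
  induction rs generalizing k with
  | nil => rfl
  | cons r rs ih => simp [blowRows, List.zipIdx_cons, length_blow, ih]

-- B's min-fold computes Mw
theorem wB_eq_Mw (r0 : List String) (rs : List (List String)) :
    (rs.zipIdx 1).foldl (fun acc ri => Nat.min acc (2 * (ri.2 + ri.1.length)))
      (2 * (0 + r0.length)) = Mw (r0 :: rs) := by
  unfold Mw
  rw [show blowRows 0 (r0 :: rs) = blow 0 r0 :: blowRows 1 rs from rfl, List.map_cons, length_blow]
  rw [show ((2 * (0 + r0.length)) :: (blowRows 1 rs).map List.length).min?
      = some (((blowRows 1 rs).map List.length).foldl min (2 * (0 + r0.length))) from rfl]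
  rw [widths_eq, List.foldl_map]
  rfl

theorem main_eq (m : List (List String)) : doplneni_diagonal2 m = doplneni_diagonal2_alt m := by
  cases m with
  | nil => rfl
  | cons r0 rs =>
    set m := r0 :: rs with hm
    unfold doplneni_diagonal2
    rw [foldA m m.length le_rfl, List.drop_length, List.append_nil]
    unfold pyZipT
    rw [Amin m (by simp [hm])]
    show _ = doplneni_diagonal2_alt (r0 :: rs)
    unfold doplneni_diagonal2_alt
    dsimp only
    rw [wB_eq_Mw, ← hm]
    refine List.map_congr_left ?_
    intro c hc
    have hcM : c < Mw m := List.mem_range.mp hc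
    refine List.ext_getElem (by simp [length_aRows, List.length_zipIdx]) ?_
    intro k hk1 hk2
    have hkn : k < m.length := by
      rw [List.length_map, length_aRows] at hk1; exact hk1
    have hA : ((aRows m m.length).map (fun r => r.getD c ""))[k]? =
        some ((af m k).getD c "") := by
      rw [List.getElem?_map, aRows_get? m hkn]; rfl
    rw [List.getElem?_eq_getElem hk1] at hA
    have hkz : k < (m.zipIdx 0).length := by rw [List.length_zipIdx]; exact hkn
    have hB : (List.map (fun ri => cellB ri.2 ri.1 c) (m.zipIdx 0))[k] =
        cellB k (m.getD k []) c := by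
      rw [List.getElem_map, List.getElem_zipIdx]
      simp [List.getD, List.getElem?_eq_getElem hkn]
    rw [Option.some.inj hA, hB]
    rw [cellB_eq_blow k (m.getD k []) (by have := Mw_le m hkn; omega)]
    exact getD_eq_of_take_eq hcM ((Qinv m k hkn).1).2

-- ===== VERDICT (by name: the statement is the Claim_ definition above) =====
theorem doplneni_diagonal2_spec : Claim_equal_doplneni_diagonal2 := by
  intro m _
  exact main_eq m
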